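-- pv_equiv track=rewrite | github.com/BRM14642/Sybase | scr/automation/sybase.py | create_string_columns
-- ===== SOURCE A (Python) =====
-- def create_string_columns(columns):
--     columns_str = ""
--     counter = 0
--     for column in columns:
--         if counter % 5 == 0 and counter > 0:
--             columns_str += "\n\t\t"
--         counter += 1
--         columns_str += f"\t{column['name']},"
--
--     columns_str = columns_str[:-1]
--
--     return columns_str
-- ===== SOURCE B (Python) =====
-- def create_string_columns(columns):
--     parts = ["\t{},".format(c["name"]) for c in columns]
--     lines = ["".join(parts[i:i + 5]) for i in range(0, len(parts), 5)]
--     return "\n\t\t".join(lines)[:-1]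
-- ===== Notes on version B (the rewrite author's own statement) =====
-- stated objective: alternative
-- what changed: Replaces the running counter with modulo test inside one string-accumulating loop by a three-stage pipeline: format all tokens, partition them into chunks of 5, join each chunk and join the chunks with the two-tab separator, then drop the trailing comma.
import Mathlib
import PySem

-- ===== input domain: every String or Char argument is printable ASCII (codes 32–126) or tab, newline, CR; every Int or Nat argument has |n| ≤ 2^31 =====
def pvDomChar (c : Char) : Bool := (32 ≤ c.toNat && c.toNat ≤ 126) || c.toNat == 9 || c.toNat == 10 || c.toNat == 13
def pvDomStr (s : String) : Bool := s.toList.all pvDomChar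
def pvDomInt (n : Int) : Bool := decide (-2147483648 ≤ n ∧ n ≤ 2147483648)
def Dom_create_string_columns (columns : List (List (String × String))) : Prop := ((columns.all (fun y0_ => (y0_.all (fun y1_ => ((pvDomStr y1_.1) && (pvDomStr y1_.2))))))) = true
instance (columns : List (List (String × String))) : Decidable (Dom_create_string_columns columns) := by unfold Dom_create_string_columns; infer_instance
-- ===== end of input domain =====

-- B restructures A's single counter/modulo loop as format-all-tokens, chunk-by-5, join; same return value, same cost.

-- column['name']: first-match lookup in the association list (Python dict access)
def pvName (c : List (String × String)) : String :=
  ((c.find? (fun kv => kv.1 == "name")).map (fun kv => kv.2)).getD ""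

-- ===== PORT A =====
def create_string_columns (columns : List (List (String × String))) : String :=
  let r := columns.foldl
    (fun (st : String × Int) column =>
      let s := if PySem.Int.mod st.2 5 == 0 && decide (0 < st.2) then st.1 ++ "\n\t\t" else st.1
      (s ++ "\t" ++ pvName column ++ ",", st.2 + 1))
    ("", 0)
  PySem.Str.slice r.1 none (some (-1))

-- ===== PORT B =====
def pvChunks5 : List String → List (List String)
  | [] => []
  | x :: xs => (x :: xs).take 5 :: pvChunks5 ((x :: xs).drop 5)
termination_by l => l.length
decreasing_by simp [List.length_drop]

def create_string_columns_alt (columns : List (List (String × String))) : String :=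
  let parts := columns.map (fun c => "\t" ++ pvName c ++ ",")
  let lines := (pvChunks5 parts).map (fun ch => PySem.Str.join "" ch)
  PySem.Str.slice (PySem.Str.join "\n\t\t" lines) none (some (-1))

-- ===== PRECONDITION & SPEC =====
-- Pre_ excludes columns missing the key "name", on which A raises KeyError (B raises there too).
def Pre_create_string_columns (columns : List (List (String × String))) : Prop :=
  ∀ c ∈ columns, (c.any (fun kv => kv.1 == "name")) = true
instance (columns : List (List (String × String))) : Decidable (Pre_create_string_columns columns) := by unfold Pre_create_string_columns; infer_instance
def pvWitness_create_string_columns : (List (List (String × String))) :=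
  [[("name", "id")], [("name", "age"), ("type", "int")]]

def Spec_create_string_columns (columns : List (List (String × String))) (out : String) : Prop := out = create_string_columns_alt columns
instance (columns : List (List (String × String))) (out : String) : Decidable (Spec_create_string_columns columns out) := by unfold Spec_create_string_columns; infer_instance

-- ===== CLAIM (what is proved, stated in full; the proofs are below) =====
def Claim_equal_create_string_columns : Prop := ∀ (columns : List (List (String × String))), Dom_create_string_columns columns → Pre_create_string_columns columns → Spec_create_string_columns columns (create_string_columns columns)

-- ===== LEMMAS AND PROOFS =====

-- canonical form: concatenation of per-index tokens, separator before indices 5,10,…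
def pvSepAt (k : Int) : String :=
  if PySem.Int.mod k 5 == 0 && decide (0 < k) then "\n\t\t" else ""

def pvCanon : List String → Int → String
  | [], _ => ""
  | p :: ps, k => pvSepAt k ++ p ++ pvCanon ps (k + 1)

lemma foldA_eq_canon (l : List (List (String × String))) :
    ∀ (acc : String) (k : Int),
      (l.foldl (fun (st : String × Int) column =>
        let s := if PySem.Int.mod st.2 5 == 0 && decide (0 < st.2) then st.1 ++ "\n\t\t" else st.1
        (s ++ "\t" ++ pvName column ++ ",", st.2 + 1)) (acc, k)).1
      = acc ++ pvCanon (l.map (fun c => "\t" ++ pvName c ++ ",")) k := by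
  induction l with
  | nil => intro acc k; simp [pvCanon]
  | cons c rest ih =>
    intro acc k
    simp only [List.foldl_cons, List.map_cons, pvCanon, pvSepAt]
    rw [ih]
    split_ifs <;> simp only [String.append_assoc, String.empty_append]

lemma sepAt_add_off {k : Int} (hm : (5:Int) ∣ k) {j : Int}
    (hj1 : 1 ≤ j) (hj4 : j ≤ 4) : pvSepAt (k + j) = "" := by
  have h : ¬ (5:Int) ∣ (k + j) := by omega
  simp [pvSepAt, h]

lemma sepAt_pos_mod {k : Int} (hm : (5:Int) ∣ k) (hk : 0 < k) :
    pvSepAt k = "\n\t\t" := by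
  simp [pvSepAt, hm, hk]

lemma sepAt_zero : pvSepAt 0 = "" := by decide

-- string form of B before the final slice
def pvJoined (l : List String) : String :=
  PySem.Str.join "\n\t\t" ((pvChunks5 l).map (fun ch => PySem.Str.join "" ch))

lemma join_nil' (sep : String) : PySem.Str.join sep [] = "" := by
  apply String.toList_inj.mp
  simp [PySem.Chars.join_nil]

lemma join_singleton' (sep x : String) : PySem.Str.join sep [x] = x := by
  apply String.toList_inj.mp
  simp [PySem.Chars.join_singleton]

lemma join_empty_cons (x : String) (xs : List String) :
    PySem.Str.join "" (x :: xs) = x ++ PySem.Str.join "" xs := by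
  cases xs with
  | nil => rw [join_singleton', join_nil', String.append_empty]
  | cons y ys =>
    apply String.toList_inj.mp
    simp [PySem.Chars.join_cons_cons]

lemma join_sep_cons_cons (x y : String) (xs : List String) :
    PySem.Str.join "\n\t\t" (x :: y :: xs) = x ++ "\n\t\t" ++ PySem.Str.join "\n\t\t" (y :: xs) := by
  apply String.toList_inj.mp
  simp [PySem.Chars.join_cons_cons]

-- pvCanon peels exactly one chunk of 5 at a chunk boundary
lemma canon_split (x : String) (xs : List String) (k : Int) (hm : (5:Int) ∣ k) :
    pvCanon (x :: xs) k
      = pvSepAt k ++ PySem.Str.join "" ((x :: xs).take 5) ++ pvCanon ((x :: xs).drop 5) (k + 5) := by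
  have o1 := sepAt_add_off hm (j := 1) (by omega) (by omega)
  have o2 := sepAt_add_off hm (j := 2) (by omega) (by omega)
  have o3 := sepAt_add_off hm (j := 3) (by omega) (by omega)
  have o4 := sepAt_add_off hm (j := 4) (by omega) (by omega)
  have e2 : k + 1 + 1 = k + 2 := by ring
  have e3 : k + 2 + 1 = k + 3 := by ring
  have e4 : k + 3 + 1 = k + 4 := by ring
  have e5 : k + 4 + 1 = k + 5 := by ring
  match xs with
  | [] =>
    simp only [pvCanon, List.take, List.drop, join_singleton', String.append_empty]
  | [b] =>
    simp only [pvCanon, List.take, List.drop, o1, join_empty_cons, join_singleton',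
      String.append_empty, String.empty_append, String.append_assoc]
  | [b, c] =>
    simp only [pvCanon, List.take, List.drop, e2, o1, o2, join_empty_cons, join_singleton',
      String.append_empty, String.empty_append, String.append_assoc]
  | [b, c, d] =>
    simp only [pvCanon, List.take, List.drop, e2, e3, o1, o2, o3, join_empty_cons,
      join_singleton', String.append_empty, String.empty_append, String.append_assoc]
  | b :: c :: d :: e :: rest =>
    simp only [pvCanon, List.take, List.drop, e2, e3, e4, e5, o1, o2, o3, o4, join_empty_cons,
      join_singleton', String.empty_append, String.append_assoc]

lemma joined_split (x : String) (xs : List String) :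
    pvJoined (x :: xs)
      = PySem.Str.join "" ((x :: xs).take 5)
        ++ (if ((x :: xs).drop 5).isEmpty then "" else "\n\t\t" ++ pvJoined ((x :: xs).drop 5)) := by
  unfold pvJoined
  rw [show pvChunks5 (x :: xs) = (x :: xs).take 5 :: pvChunks5 ((x :: xs).drop 5) from by
    rw [pvChunks5]]
  cases hd : (x :: xs).drop 5 with
  | nil =>
    rw [show pvChunks5 ([] : List String) = [] from by rw [pvChunks5]]
    simp only [List.map_cons, List.map_nil]
    rw [join_singleton']
    simp
  | cons y ys =>
    rw [show pvChunks5 (y :: ys) = (y :: ys).take 5 :: pvChunks5 ((y :: ys).drop 5) from by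
      rw [pvChunks5]]
    simp only [List.map_cons, List.isEmpty_cons, Bool.false_eq_true, if_false]
    rw [join_sep_cons_cons, String.append_assoc]

lemma canon_boundary (n : Nat) : ∀ (l : List String), l.length ≤ n →
    ∀ (k : Int), 0 < k → (5:Int) ∣ k →
    pvCanon l k = (if l.isEmpty then "" else "\n\t\t" ++ pvJoined l) := by
  induction n with
  | zero =>
    intro l hl k _ _
    have : l = [] := List.eq_nil_of_length_eq_zero (Nat.le_zero.mp hl)
    subst this; simp [pvCanon]
  | succ n ih =>
    intro l hl k hk hm
    cases l with
    | nil => simp [pvCanon]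
    | cons x xs =>
      rw [canon_split x xs k hm, sepAt_pos_mod hm hk]
      have hm5 : (5:Int) ∣ (k + 5) := by omega
      have hlen : ((x :: xs).drop 5).length ≤ n := by
        rw [List.length_drop]
        simp only [List.length_cons] at hl ⊢
        omega
      rw [ih ((x :: xs).drop 5) hlen (k + 5) (by omega) hm5]
      rw [joined_split x xs]
      by_cases hd : ((x :: xs).drop 5).isEmpty
      · simp [String.append_assoc]
      · simp [String.append_assoc]

lemma canon_zero (l : List String) : pvCanon l 0 = pvJoined l := by
  cases l with
  | nil =>
    show pvCanon [] 0 = PySem.Str.join "\n\t\t" ((pvChunks5 []).map _)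
    rw [show pvChunks5 [] = [] from by rw [pvChunks5]]
    simp only [List.map_nil]
    rw [join_nil']
    rfl
  | cons x xs =>
    rw [canon_split x xs 0 (by omega), sepAt_zero]
    have hm5 : (5:Int) ∣ (0 + 5 : Int) := by omega
    rw [canon_boundary ((x :: xs).drop 5).length _ (le_refl _) (0 + 5) (by omega) hm5]
    rw [joined_split x xs]
    by_cases hd : ((x :: xs).drop 5).isEmpty
    · simp
    · simp

-- ===== VERDICT (by name: the statement is the Claim_ definition above) =====
theorem create_string_columns_spec : Claim_equal_create_string_columns := by
  intro columns _ _
  unfold Spec_create_string_columns create_string_columns create_string_columns_alt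
  simp only []
  rw [foldA_eq_canon columns "" 0, canon_zero]
  rfl
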